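-- pv_equiv track=rewrite | github.com/zhengzhent/MegaCQA | construction/QA/radar.py | get_lab_over_result
-- ===== SOURCE A (Python) =====
-- def get_index_greater_than(data, row_index, x):
--     if row_index < 0 or row_index >= len(data):
--         raise ValueError("行索引超出范围")
--     indices = [i for i, v in enumerate(data[row_index]) if v > x]
--     return indices if indices else "None"
--
-- def get_lab_over_result(data, row_index, dimensions, threshold):
--     indices = get_index_greater_than(data, row_index, threshold)
--     if indices == "None":
--         return f"None is over {threshold}"
--     else:
--         result_list = []
--         for idx in indices:
--             result_list.append(f"{{{dimensions[idx]}}} is {{{data[row_index][idx]}}}")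
--         return ", ".join(result_list)
-- ===== SOURCE B (Python) =====
-- def get_lab_over_result(data, row_index, dimensions, threshold):
--     if row_index < 0 or row_index >= len(data):
--         raise ValueError("行索引超出范围")
--     out = None
--     for i, v in reversed(list(enumerate(data[row_index]))):
--         if v > threshold:
--             piece = f"{{{dimensions[i]}}} is {{{v}}}"
--             out = piece if out is None else piece + ", " + out
--     return f"None is over {threshold}" if out is None else out
-- ===== Notes on version B (the rewrite author's own statement) =====
-- stated objective: alternative
-- what changed: Replaced the index-list helper (with its 'None' string sentinel) plus a second indexing loop and ', '.join by a single backwards traversal of the enumerated row that builds the final string directly in an Optional-string accumulator, prepending ', ' as it goes; no intermediate list, no join.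
import Mathlib
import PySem

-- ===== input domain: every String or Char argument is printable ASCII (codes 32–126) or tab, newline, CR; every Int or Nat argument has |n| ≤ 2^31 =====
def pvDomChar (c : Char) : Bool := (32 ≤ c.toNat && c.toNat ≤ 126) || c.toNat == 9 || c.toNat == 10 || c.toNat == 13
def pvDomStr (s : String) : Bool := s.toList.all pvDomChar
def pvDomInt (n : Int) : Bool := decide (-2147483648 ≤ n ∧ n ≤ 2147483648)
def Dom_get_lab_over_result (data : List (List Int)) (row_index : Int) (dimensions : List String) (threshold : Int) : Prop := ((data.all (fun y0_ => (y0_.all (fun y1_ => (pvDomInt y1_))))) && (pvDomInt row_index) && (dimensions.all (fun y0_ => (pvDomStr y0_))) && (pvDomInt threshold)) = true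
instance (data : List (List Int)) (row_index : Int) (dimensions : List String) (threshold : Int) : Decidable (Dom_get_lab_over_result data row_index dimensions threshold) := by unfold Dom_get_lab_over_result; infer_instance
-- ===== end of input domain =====

-- B replaces A's index-list helper + second indexing loop + ", ".join by one backwards
-- traversal of the enumerated row that builds the final string directly in an
-- Option-string accumulator (alternative decomposition, same cost).


-- ===== PORT A =====
-- helper: returns `none` both for the "None" sentinel and for the ValueError row
-- (the raise is excluded by Pre_, so the port's value there is irrelevant)
def get_index_greater_than (data : List (List Int)) (row_index : Int) (x : Int) : Option (List Int) :=
  if row_index < 0 ∨ PySem.List.len data ≤ row_index then none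
  else
    let indices := ((PySem.List.enumerate (PySem.List.pyGetD data row_index []) 0).filter
      (fun p => x < p.2)).map (·.1)
    if indices.isEmpty then none else some indices

def get_lab_over_result (data : List (List Int)) (row_index : Int) (dimensions : List String) (threshold : Int) : String :=
  match get_index_greater_than data row_index threshold with
  | none => "None is over " ++ PySem.Int.toStr threshold
  | some indices =>
      let result_list := indices.foldl (fun acc idx =>
        acc ++ ["{" ++ PySem.List.pyGetD dimensions idx "" ++ "} is {" ++
          PySem.Int.toStr (PySem.List.pyGetD (PySem.List.pyGetD data row_index []) idx 0) ++ "}"]) []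
      PySem.Str.join ", " result_list

-- ===== PORT B =====
def get_lab_over_result_alt (data : List (List Int)) (row_index : Int) (dimensions : List String) (threshold : Int) : String :=
  if row_index < 0 ∨ PySem.List.len data ≤ row_index then ""  -- ValueError in Python; excluded by Pre_
  else
    let out := (PySem.List.enumerate (PySem.List.pyGetD data row_index []) 0).reverse.foldl
      (fun acc p => if threshold < p.2 then
          let piece := "{" ++ PySem.List.pyGetD dimensions p.1 "" ++ "} is {" ++ PySem.Int.toStr p.2 ++ "}"
          some (match acc with | none => piece | some s => piece ++ ", " ++ s)
        else acc) none
    match out with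
    | none => "None is over " ++ PySem.Int.toStr threshold
    | some s => s

-- ===== PRECONDITION & SPEC =====
-- Pre_ excludes exactly the inputs where the Python A raises: a row index out of range
-- (ValueError) or an over-threshold column index past the end of `dimensions` (IndexError).
def Pre_get_lab_over_result (data : List (List Int)) (row_index : Int) (dimensions : List String) (threshold : Int) : Prop :=
  0 ≤ row_index ∧ row_index < PySem.List.len data ∧
  ∀ p ∈ PySem.List.enumerate (PySem.List.pyGetD data row_index []) 0,
    threshold < p.2 → p.1 < (dimensions.length : Int)
instance (data : List (List Int)) (row_index : Int) (dimensions : List String) (threshold : Int) : Decidable (Pre_get_lab_over_result data row_index dimensions threshold) := by unfold Pre_get_lab_over_result; infer_instance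

def pvWitness_get_lab_over_result : List (List Int) × Int × List String × Int :=
  ([[1, 5], [3, 0]], 0, ["a", "b"], 2)

def Spec_get_lab_over_result (data : List (List Int)) (row_index : Int) (dimensions : List String) (threshold : Int) (out : String) : Prop := out = get_lab_over_result_alt data row_index dimensions threshold
instance (data : List (List Int)) (row_index : Int) (dimensions : List String) (threshold : Int) (out : String) : Decidable (Spec_get_lab_over_result data row_index dimensions threshold out) := by unfold Spec_get_lab_over_result; infer_instance

-- ===== CLAIM (what is proved, stated in full; the proofs are below) =====
def Claim_equal_get_lab_over_result : Prop := ∀ (data : List (List Int)) (row_index : Int) (dimensions : List String) (threshold : Int), Dom_get_lab_over_result data row_index dimensions threshold → Pre_get_lab_over_result data row_index dimensions threshold → Spec_get_lab_over_result data row_index dimensions threshold (get_lab_over_result data row_index dimensions threshold)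

-- ===== LEMMAS AND PROOFS =====

-- every enumerated pair reads back: row[p.1] = p.2
lemma pyGetD_of_mem_enumerate (row : List Int) (p : Int × Int)
    (hp : p ∈ PySem.List.enumerate row 0) :
    PySem.List.pyGetD row p.1 0 = p.2 := by
  rcases (PySem.List.mem_enumerate_iff row 0 p).1 hp with ⟨k, hk, rfl⟩
  simp [PySem.List.pyGetD_natCast, List.getD_eq_getElem?_getD, hk]

lemma str_join_cons_cons (sep a b : String) (rest : List String) :
    PySem.Str.join sep (a :: b :: rest) = a ++ sep ++ PySem.Str.join sep (b :: rest) := by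
  apply String.toList_inj.mp
  simp [PySem.Str.toList_join, PySem.Chars.join_cons_cons]

lemma str_join_singleton (sep a : String) :
    PySem.Str.join sep [a] = a := by
  apply String.toList_inj.mp
  simp [PySem.Str.toList_join, PySem.Chars.join, List.intercalate]

-- B's backwards loop builds exactly (the join of) A's filtered-and-formatted list
lemma loopB_eq (l : List (Int × Int)) (dims : List String) (th : Int) :
    l.reverse.foldl (fun acc p => if th < p.2 then
        let piece := "{" ++ PySem.List.pyGetD dims p.1 "" ++ "} is {" ++ PySem.Int.toStr p.2 ++ "}"
        some (match acc with | none => piece | some s => piece ++ ", " ++ s)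
      else acc) none
    = (match (l.filter (fun p => decide (th < p.2))).map
        (fun p => "{" ++ PySem.List.pyGetD dims p.1 "" ++ "} is {" ++ PySem.Int.toStr p.2 ++ "}") with
       | [] => none
       | x :: rest => some (PySem.Str.join ", " (x :: rest))) := by
  rw [List.foldl_reverse]
  induction l with
  | nil => simp
  | cons x xs ih =>
    rw [List.foldr_cons, ih]
    by_cases h : th < x.2
    · cases hxs : (xs.filter (fun p => decide (th < p.2))).map
          (fun p => "{" ++ PySem.List.pyGetD dims p.1 "" ++ "} is {" ++ PySem.Int.toStr p.2 ++ "}") with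
      | nil =>
        simp only [List.filter_cons, h, decide_true, if_true, ite_true, List.map_cons, hxs]
        rw [str_join_singleton]
      | cons y ys =>
        simp only [List.filter_cons, h, decide_true, if_true, ite_true, List.map_cons, hxs]
        rw [str_join_cons_cons]
    · simp [List.filter_cons, h]

-- ===== VERDICT (by name: the statement is the Claim_ definition above) =====
theorem get_lab_over_result_spec : Claim_equal_get_lab_over_result := by
  intro data row_index dimensions threshold _ hpre
  obtain ⟨h0, h1, _⟩ := hpre
  have hg : ¬ (row_index < 0 ∨ PySem.List.len data ≤ row_index) := by
    rw [not_or]; exact ⟨not_lt.2 h0, not_le.2 h1⟩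
  unfold Spec_get_lab_over_result get_lab_over_result get_lab_over_result_alt
    get_index_greater_than
  rw [if_neg hg, if_neg hg, loopB_eq]
  simp only [PySem.List.foldl_append_singleton_eq_map, List.nil_append, List.isEmpty_iff]
  have hmapeq : ((PySem.List.enumerate (PySem.List.pyGetD data row_index []) 0).filter
        (fun p => decide (threshold < p.2))).map
        ((fun idx => "{" ++ PySem.List.pyGetD dimensions idx "" ++ "} is {" ++
          PySem.Int.toStr (PySem.List.pyGetD (PySem.List.pyGetD data row_index []) idx 0) ++ "}") ∘ (·.1))
      = ((PySem.List.enumerate (PySem.List.pyGetD data row_index []) 0).filter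
        (fun p => decide (threshold < p.2))).map
        (fun p => "{" ++ PySem.List.pyGetD dimensions p.1 "" ++ "} is {" ++ PySem.Int.toStr p.2 ++ "}") := by
    apply List.map_congr_left
    intro p hp
    have hmem := List.mem_of_mem_filter hp
    simp only [Function.comp]
    rw [pyGetD_of_mem_enumerate _ p hmem]
  cases hL : ((PySem.List.enumerate (PySem.List.pyGetD data row_index []) 0).filter
      (fun p => decide (threshold < p.2))) with
  | nil => simp [hL] at hmapeq ⊢
  | cons q qs =>
    rw [hL] at hmapeq
    have hne : ((q :: qs).map (fun x : Int × Int => x.1)) ≠ [] := by simp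
    rw [if_neg hne]
    show PySem.Str.join ", " _ = PySem.Str.join ", " _
    rw [List.map_map, hmapeq]
    simp
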